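-- pv_equiv track=rewrite | github.com/PogorelskiyGrigoriy/python-data-structures | src/max_negative_representive.py | max_negative_representive
-- ===== SOURCE A (Python) =====
-- def max_negative_representive(arr) -> int:
--     set_for_negatives = set()
--     result = -1
--
--     for num in arr:
--         if num < 0:
--             set_for_negatives.add(-num)
--
--     for num in arr:
--         if num > 0 and num in set_for_negatives:
--             result = max(result, num)
--
--     return result
-- ===== SOURCE B (Python) =====
-- def max_negative_representive(arr) -> int:
--     s = sorted(set(arr))
--     i, j = 0, len(s) - 1
--     while i < j:
--         total = s[i] + s[j]
--         if total == 0: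
--             return s[j]
--         if total > 0:
--             j -= 1
--         else:
--             i += 1
--     return -1
-- ===== Notes on version B (the rewrite author's own statement) =====
-- stated objective: alternative
-- what changed: Replaces A's two set-building/membership passes with a sorted distinct list scanned by two pointers from both ends: the first zero-sum pair found gives the answer, with no membership tests and no running max.
import Mathlib
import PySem

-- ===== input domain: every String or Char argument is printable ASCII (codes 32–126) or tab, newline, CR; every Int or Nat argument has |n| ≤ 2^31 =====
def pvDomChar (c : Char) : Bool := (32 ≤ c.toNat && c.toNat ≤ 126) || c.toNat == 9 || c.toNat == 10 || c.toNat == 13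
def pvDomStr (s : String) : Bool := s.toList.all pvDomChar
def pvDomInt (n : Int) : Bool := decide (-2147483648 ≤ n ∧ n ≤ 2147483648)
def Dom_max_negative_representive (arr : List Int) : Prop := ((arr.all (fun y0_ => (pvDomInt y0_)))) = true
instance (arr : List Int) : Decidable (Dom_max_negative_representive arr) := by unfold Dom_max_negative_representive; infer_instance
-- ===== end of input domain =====

-- B sorts the distinct elements and runs a two-pointer scan from both ends for a zero-sum
-- pair, instead of A's set-of-negated-negatives membership pass with a running max (objective: alternative).

-- ===== PORT A =====
def max_negative_representive (arr : List Int) : Int :=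
  let set_for_negatives : PySem.Set Int :=
    arr.foldl (fun s num => if num < 0 then PySem.Set.add s (-num) else s) PySem.Set.empty
  arr.foldl
    (fun result num =>
      if num > 0 && PySem.Set.contains set_for_negatives num then max result num else result)
    (-1)

-- ===== PORT B =====
-- the 'while i < j' loop of Source B (indices stay in range on every real execution; s[·]! is exact there)
def pvTwoPtr (s : List Int) (i j : Nat) : Int :=
  if i < j then
    if s[i]! + s[j]! = 0 then s[j]!
    else if s[i]! + s[j]! > 0 then pvTwoPtr s i (j - 1)
    else pvTwoPtr s (i + 1) j
  else -1
termination_by j - i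
decreasing_by all_goals omega

def max_negative_representive_alt (arr : List Int) : Int :=
  let s : List Int := PySem.List.sorted (PySem.Set.ofList arr) (fun y => y) false
  pvTwoPtr s 0 (s.length - 1)

-- ===== PRECONDITION & SPEC =====
def Spec_max_negative_representive (arr : List Int) (out : Int) : Prop := out = max_negative_representive_alt arr
instance (arr : List Int) (out : Int) : Decidable (Spec_max_negative_representive arr out) := by unfold Spec_max_negative_representive; infer_instance

-- ===== CLAIM (what is proved, stated in full; the proofs are below) =====
def Claim_equal_max_negative_representive : Prop := ∀ (arr : List Int), Dom_max_negative_representive arr → Spec_max_negative_representive arr (max_negative_representive arr)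

-- ===== LEMMAS AND PROOFS =====

-- the value both programs compute: the largest y with y ∈ arr, y > 0 and -y ∈ arr (or -1)
def pvGood (arr : List Int) (y : Int) : Prop := y ∈ arr ∧ 0 < y ∧ (-y) ∈ arr

-- a zero-sum pair of positions in the window [i, j] of s, with value the right element
def pvQ (s : List Int) (i j : Nat) (y : Int) : Prop :=
  ∃ a b : Nat, i ≤ a ∧ a < b ∧ b ≤ j ∧ b < s.length ∧ s[a]! + s[b]! = 0 ∧ y = s[b]!

theorem pv_getElem!_lt (s : List Int) (hs : s.Pairwise (· < ·)) {a b : Nat}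
    (hab : a < b) (hb : b < s.length) : s[a]! < s[b]! := by
  have ha : a < s.length := lt_trans hab hb
  rw [getElem!_pos s a ha, getElem!_pos s b hb]
  exact (List.pairwise_iff_getElem.mp hs) a b ha hb hab

theorem pv_getElem!_le (s : List Int) (hs : s.Pairwise (· < ·)) {a b : Nat}
    (hab : a ≤ b) (hb : b < s.length) : s[a]! ≤ s[b]! := by
  rcases Nat.lt_or_ge a b with h | h
  · exact le_of_lt (pv_getElem!_lt s hs h hb)
  · have : a = b := le_antisymm hab h
    subst this; exact le_refl _

-- two-pointer correctness: on a strictly increasing list the loop returns the largest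
-- right element of a zero-sum pair inside the window, or -1 when there is none
theorem pvTwoPtr_spec (s : List Int) (hs : s.Pairwise (· < ·)) :
    ∀ i j : Nat, (j < s.length ∨ j ≤ i) →
      (∀ y, pvQ s i j y → y ≤ pvTwoPtr s i j) ∧
      (pvTwoPtr s i j = -1 ∨ pvQ s i j (pvTwoPtr s i j)) := by
  intro i j
  induction i, j using pvTwoPtr.induct s with
  | case1 i j hij h0 =>
    intro hrange
    have hjl : j < s.length := by omega
    rw [pvTwoPtr]; simp only [hij, if_pos, if_pos h0]
    constructor
    · rintro y ⟨a, b, hia, hab, hbj, hb, hsum, rfl⟩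
      exact pv_getElem!_le s hs hbj hjl
    · right
      exact ⟨i, j, le_refl i, hij, le_refl j, hjl, h0, rfl⟩
  | case2 i j hij h0 hpos ih =>
    intro hrange
    have hjl : j < s.length := by omega
    rw [pvTwoPtr]; simp only [hij, if_pos, if_neg h0, if_pos hpos]
    obtain ⟨ihub, ihmem⟩ := ih (Or.inl (by omega))
    constructor
    · rintro y ⟨a, b, hia, hab, hbj, hb, hsum, rfl⟩
      apply ihub
      have hbne : b ≠ j := by
        rintro rfl
        have : s[i]! ≤ s[a]! := pv_getElem!_le s hs hia (lt_trans hab hb)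
        omega
      exact ⟨a, b, hia, hab, by omega, hb, hsum, rfl⟩
    · rcases ihmem with h | ⟨a, b, hia, hab, hbj, hb, hsum, hy⟩
      · left; exact h
      · right; exact ⟨a, b, hia, hab, by omega, hb, hsum, hy⟩
  | case3 i j hij h0 hpos ih =>
    intro hrange
    have hjl : j < s.length := by omega
    rw [pvTwoPtr]; simp only [hij, if_pos, if_neg h0, if_neg hpos]
    obtain ⟨ihub, ihmem⟩ := ih (Or.inl hjl)
    constructor
    · rintro y ⟨a, b, hia, hab, hbj, hb, hsum, rfl⟩
      apply ihub
      have hane : a ≠ i := by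
        rintro rfl
        have : s[b]! ≤ s[j]! := pv_getElem!_le s hs hbj hjl
        omega
      exact ⟨a, b, by omega, hab, hbj, hb, hsum, rfl⟩
    · rcases ihmem with h | ⟨a, b, hia, hab, hbj, hb, hsum, hy⟩
      · left; exact h
      · right; exact ⟨a, b, by omega, hab, hbj, hb, hsum, hy⟩
  | case4 i j hij =>
    intro _
    rw [pvTwoPtr]; simp only [hij]
    constructor
    · rintro y ⟨a, b, hia, hab, hbj, hb, hsum, rfl⟩; omega
    · left; rfl

-- A-side: the conditional-add fold is the add-fold over the filtered list
theorem pv_foldl_addneg_eq (arr : List Int) (s : PySem.Set Int) :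
    arr.foldl (fun s num => if num < 0 then PySem.Set.add s (-num) else s) s
      = (arr.filter (fun x => decide (x < 0))).foldl (fun s n => PySem.Set.add s (-n)) s := by
  induction arr generalizing s with
  | nil => rfl
  | cons x t ih =>
    by_cases h : x < 0 <;> simp [List.foldl, List.filter, h, ih]

-- A-side: the conditional-max fold is the max fold over the filtered list
theorem pv_foldl_ifmax_eq (p : Int → Bool) (arr : List Int) (i : Int) :
    arr.foldl (fun r x => if p x then max r x else r) i = (arr.filter p).foldl max i := by
  induction arr generalizing i with
  | nil => rfl
  | cons x t ih =>
    by_cases h : p x <;> simp [List.foldl, List.filter, h, ih]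

theorem pv_le_foldl_max (l : List Int) (i : Int) : i ≤ l.foldl max i := by
  induction l generalizing i with
  | nil => simp
  | cons x t ih => exact le_trans (le_max_left i x) (ih (max i x))

theorem pv_mem_le_foldl_max (l : List Int) (i x : Int) (hx : x ∈ l) : x ≤ l.foldl max i := by
  induction l generalizing i with
  | nil => cases hx
  | cons y t ih =>
    rcases List.mem_cons.mp hx with h | h
    · subst h; exact le_trans (le_max_right i x) (pv_le_foldl_max t (max i x))
    · exact ih (max i y) h

theorem pv_foldl_max_mem (l : List Int) (i : Int) :
    l.foldl max i = i ∨ l.foldl max i ∈ l := by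
  induction l generalizing i with
  | nil => left; rfl
  | cons x t ih =>
    rcases ih (max i x) with h | h
    · rcases max_choice i x with hm | hm
      · left; rw [List.foldl, h, hm]
      · right; rw [List.foldl, h, hm]; exact List.mem_cons_self
    · right; exact List.mem_cons_of_mem _ h

-- A computes the largest good value (or -1)
theorem pvA_sat (arr : List Int) :
    (∀ y, pvGood arr y → y ≤ max_negative_representive arr) ∧
    (max_negative_representive arr = -1 ∨ pvGood arr (max_negative_representive arr)) := by
  unfold max_negative_representive
  simp only []
  set s : PySem.Set Int :=
    arr.foldl (fun s num => if num < 0 then PySem.Set.add s (-num) else s) PySem.Set.empty with hs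
  have hmem_s : ∀ y : Int, y ∈ s ↔ ∃ n ∈ arr, n < 0 ∧ y = -n := by
    intro y
    rw [hs, pv_foldl_addneg_eq, PySem.Set.mem_foldl_add]
    simp [PySem.Set.empty, List.mem_filter]
    constructor
    · rintro ⟨n, ⟨hn, hlt⟩, rfl⟩; exact ⟨n, hn, hlt, rfl⟩
    · rintro ⟨n, hn, hlt, rfl⟩; exact ⟨n, ⟨hn, hlt⟩, rfl⟩
  have hfilter : ∀ x : Int,
      x ∈ arr.filter (fun num => num > 0 && PySem.Set.contains s num) ↔ pvGood arr x := by
    intro x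
    unfold pvGood
    simp only [List.mem_filter, Bool.and_eq_true, decide_eq_true_eq,
      PySem.Set.contains_iff, hmem_s]
    constructor
    · rintro ⟨hx, hpos, n, hn, hlt, rfl⟩
      exact ⟨hx, hpos, by simpa using hn⟩
    · rintro ⟨hx, hpos, hneg⟩
      exact ⟨hx, hpos, -x, hneg, by omega, by ring⟩
  rw [pv_foldl_ifmax_eq]
  constructor
  · intro y hy
    exact pv_mem_le_foldl_max _ _ _ ((hfilter y).mpr hy)
  · rcases pv_foldl_max_mem (arr.filter (fun num => num > 0 && PySem.Set.contains s num)) (-1)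
      with h | h
    · left; exact h
    · right; exact (hfilter _).mp h

-- bridge: zero-sum pairs of the sorted distinct list are exactly the good values
theorem pvQ_iff_good (arr : List Int) (y : Int) :
    pvQ (PySem.List.sorted (PySem.Set.ofList arr) (fun y => y) false) 0
        ((PySem.List.sorted (PySem.Set.ofList arr) (fun y => y) false).length - 1) y
      ↔ pvGood arr y := by
  set t := PySem.List.sorted (PySem.Set.ofList arr) (fun y => y) false with ht
  have hstrict : t.Pairwise (· < ·) := by
    rw [ht]; exact PySem.List.sorted_ofList_pairwise_lt arr
  have hmem : ∀ x : Int, x ∈ t ↔ x ∈ arr := by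
    intro x; rw [ht, PySem.List.mem_sorted, PySem.Set.mem_ofList]
  constructor
  · rintro ⟨a, b, _, hab, hbj, hb, hsum, rfl⟩
    have ha : a < t.length := lt_trans hab hb
    have hlt : t[a]! < t[b]! := pv_getElem!_lt t hstrict hab hb
    refine ⟨(hmem _).mp ?_, by omega, (hmem _).mp ?_⟩
    · rw [getElem!_pos t b hb]; exact List.getElem_mem hb
    · have : -t[b]! = t[a]! := by omega
      rw [this, getElem!_pos t a ha]; exact List.getElem_mem ha
  · rintro ⟨hy, hpos, hneg⟩
    obtain ⟨b, hb, hbv⟩ := List.mem_iff_getElem.mp ((hmem y).mpr hy)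
    obtain ⟨a, ha, hav⟩ := List.mem_iff_getElem.mp ((hmem (-y)).mpr hneg)
    have hab : a < b := by
      rcases Nat.lt_or_ge a b with h | h
      · exact h
      · exfalso
        have : t[b]! ≤ t[a]! := pv_getElem!_le t hstrict h ha
        rw [getElem!_pos t b hb, getElem!_pos t a ha, hbv, hav] at this
        omega
    exact ⟨a, b, Nat.zero_le a, hab, by omega, hb,
      by rw [getElem!_pos t a ha, getElem!_pos t b hb, hav, hbv]; ring,
      by rw [getElem!_pos t b hb, hbv]⟩

-- B computes the largest good value (or -1)
theorem pvB_sat (arr : List Int) :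
    (∀ y, pvGood arr y → y ≤ max_negative_representive_alt arr) ∧
    (max_negative_representive_alt arr = -1 ∨ pvGood arr (max_negative_representive_alt arr)) := by
  unfold max_negative_representive_alt
  simp only []
  set t := PySem.List.sorted (PySem.Set.ofList arr) (fun y => y) false with ht
  have hstrict : t.Pairwise (· < ·) := by
    rw [ht]; exact PySem.List.sorted_ofList_pairwise_lt arr
  have hrange : t.length - 1 < t.length ∨ t.length - 1 ≤ 0 := by
    cases t with
    | nil => right; rfl
    | cons x l => left; simp
  obtain ⟨hub, hmem⟩ := pvTwoPtr_spec t hstrict 0 (t.length - 1) hrange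
  constructor
  · intro y hy
    refine hub y ?_
    have := (pvQ_iff_good arr y).mpr hy
    rw [ht]; exact this
  · rcases hmem with h | h
    · left; exact h
    · right
      apply (pvQ_iff_good arr _).mp
      rw [ht] at h; exact h

-- ===== VERDICT (by name: the statement is the Claim_ definition above) =====
theorem max_negative_representive_spec : Claim_equal_max_negative_representive := by
  intro arr _
  unfold Spec_max_negative_representive
  obtain ⟨hubA, hmemA⟩ := pvA_sat arr
  obtain ⟨hubB, hmemB⟩ := pvB_sat arr
  rcases hmemA with hA | hA
  · rcases hmemB with hB | hB
    · rw [hA, hB]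
    · exfalso
      have h1 := hubA _ hB
      have : (0 : Int) < max_negative_representive_alt arr := hB.2.1
      omega
  · rcases hmemB with hB | hB
    · exfalso
      have h1 := hubB _ hA
      have : (0 : Int) < max_negative_representive arr := hA.2.1
      omega
    · exact le_antisymm (hubB _ hA) (hubA _ hB)
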